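-- pv_equiv track=rewrite | github.com/G30v4/Courses_codes | COURSERA/UPC/Introduccion a la programacion en Python I/S5/S5_EJ_C1-P3.py | ocurrencias
-- ===== SOURCE A (Python) =====
-- def ocurrencias(string):
--   ceros = 0
--   unos = 0
--   for s in string:
--     if s == "1":
--       unos += 1
--     else:
--       ceros += 1
--   return unos - ceros # aquí debes retornar el resultado
-- ===== SOURCE B (Python) =====
-- def ocurrencias(string):
--   # divide and conquer: each char contributes +1 if '1' else -1;
--   # split at the midpoint and sum the two halves recursively
--   if len(string) == 0:
--     return 0
--   if len(string) == 1:
--     return 1 if string == "1" else -1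
--   m = len(string) // 2
--   return ocurrencias(string[:m]) + ocurrencias(string[m:])
-- ===== Notes on version B (the rewrite author's own statement) =====
-- stated objective: alternative
-- what changed: Replaces the two-counter accumulating loop with a divide-and-conquer recursion: base cases for empty/one-char strings, otherwise the string is split at the midpoint and the two halves' signed contributions (+1 per '1', -1 per other char) are summed.
import Mathlib
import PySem

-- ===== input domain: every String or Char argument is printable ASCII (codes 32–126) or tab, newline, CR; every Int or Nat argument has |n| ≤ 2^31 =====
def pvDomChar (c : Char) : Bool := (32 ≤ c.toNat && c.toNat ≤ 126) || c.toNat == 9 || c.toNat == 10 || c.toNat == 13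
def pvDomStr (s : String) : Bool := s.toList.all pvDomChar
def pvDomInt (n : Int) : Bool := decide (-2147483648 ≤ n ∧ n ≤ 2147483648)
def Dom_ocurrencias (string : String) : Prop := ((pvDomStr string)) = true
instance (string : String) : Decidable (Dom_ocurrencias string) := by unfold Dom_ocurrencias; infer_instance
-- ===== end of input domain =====

-- B replaces A's two-counter accumulating loop with a midpoint divide-and-conquer
-- recursion summing signed per-character contributions (alternative decomposition).

-- ===== PORT A =====
-- two counters ceros/unos, one pass, branch per character; returns unos - ceros
def ocurrencias (string : String) : Int :=
  let p := string.toList.foldl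
    (fun (p : Int × Int) s => if s == '1' then (p.1, p.2 + 1) else (p.1 + 1, p.2))
    ((0 : Int), (0 : Int))
  p.2 - p.1

-- ===== PORT B =====
-- Source B's recursion on the character list; string[:m]/string[m:] with
-- 0 ≤ m ≤ len are exactly List.take m / List.drop m, and len(string)//2 on the
-- nonnegative Nat length is exactly Lean's / (exact on this domain)
def ocurrenciasGo (l : List Char) : Int :=
  if l.length = 0 then 0
  else if l.length = 1 then (if l = ['1'] then 1 else -1)
  else
    let m := l.length / 2
    ocurrenciasGo (l.take m) + ocurrenciasGo (l.drop m)
termination_by l.length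
decreasing_by
  · simp only [List.length_take]; omega
  · simp only [List.length_drop]; omega

def ocurrencias_alt (string : String) : Int := ocurrenciasGo string.toList

-- ===== PRECONDITION & SPEC =====
def Spec_ocurrencias (string : String) (out : Int) : Prop := out = ocurrencias_alt string
instance (string : String) (out : Int) : Decidable (Spec_ocurrencias string out) := by unfold Spec_ocurrencias; infer_instance

-- ===== CLAIM =====
def Claim_equal_ocurrencias : Prop := ∀ (string : String), Dom_ocurrencias string → Spec_ocurrencias string (ocurrencias string)

-- ===== LEMMAS AND PROOFS =====

-- B's recursion computes 2*count('1') - length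
theorem ocurrenciasGo_eq (l : List Char) :
    ocurrenciasGo l = 2 * (l.count '1' : Int) - (l.length : Int) := by
  induction l using ocurrenciasGo.induct with
  | case1 l h => rw [ocurrenciasGo, if_pos h]; simp [List.length_eq_zero_iff.mp h]
  | case2 h h1 => rw [ocurrenciasGo, if_neg h, if_pos h1]; simp
  | case3 l h h1 h2 =>
    rw [ocurrenciasGo, if_neg h, if_pos h1, if_neg h2]
    obtain ⟨c, hc⟩ := List.length_eq_one_iff.mp h1
    subst hc
    simp only [List.cons.injEq, and_true] at h2
    simp [h2]
  | case4 l h h1 m ih1 ih2 =>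
    rw [ocurrenciasGo, if_neg h, if_neg h1]
    have hsplit : l.take m ++ l.drop m = l := List.take_append_drop m l
    have hc : l.count '1' = (l.take m).count '1' + (l.drop m).count '1' := by
      conv_lhs => rw [← hsplit]
      rw [List.count_append]
    have hl : l.length = (l.take m).length + (l.drop m).length := by
      conv_lhs => rw [← hsplit]
      rw [List.length_append]
    show ocurrenciasGo (l.take m) + ocurrenciasGo (l.drop m)
      = 2 * (l.count '1' : Int) - (l.length : Int)
    rw [ih1, ih2]
    omega

-- A's fold invariant: the pair is (non-'1' count, '1' count)
theorem fold_pair (l : List Char) (a b : Int) :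
    l.foldl (fun (p : Int × Int) s => if s == '1' then (p.1, p.2 + 1) else (p.1 + 1, p.2)) (a, b)
      = (a + ((l.length : Int) - (l.count '1' : Int)), b + (l.count '1' : Int)) := by
  induction l generalizing a b with
  | nil => simp
  | cons x t ih =>
    rw [List.foldl_cons]
    by_cases hx : x = '1'
    · rw [if_pos (by simp [hx]), ih]
      refine Prod.ext ?_ ?_ <;> simp [hx]; omega
    · rw [if_neg (by simp [hx]), ih]
      refine Prod.ext ?_ ?_ <;> simp [hx]; omega

-- ===== VERDICT =====
theorem ocurrencias_spec : Claim_equal_ocurrencias := by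
  intro s _
  unfold Spec_ocurrencias ocurrencias ocurrencias_alt
  rw [fold_pair, ocurrenciasGo_eq]
  push_cast
  ring
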